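-- pv_equiv track=rewrite | github.com/sheba76545/popik97 | games10.py | game
-- ===== SOURCE A (Python) =====
-- def game(x, y, lvl=0):
--     if x + y >= 38:
--         return 'go'
--     if lvl > 5:
--         return('dauuuuuun')
--     results = [game(x + 2, y, lvl + 1), game(x + y, y, lvl + 1),
--                game(x, y + 2, lvl + 1), game(x, y + x, lvl + 1)]
--     if any(r == "go" for r in results):
--         return "w1"
--     elif all(r == "w1" for r in results):
--         return "l1"
--     elif any(r == "l1" for r in results):
--         return "w2"
--     elif all(r == "w1" or r == "w2" for r in results):
--         return "l2"
-- ===== SOURCE B (Python) =====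
-- def game(x, y, lvl=0):
--     # Same game tree, but with memoization on (x, y, lvl): repeated subtrees are
--     # computed once per top-level call instead of being re-expanded.
--     cache = {}
--
--     def solve(x, y, lvl):
--         if x + y >= 38:
--             return 'go'
--         if lvl > 5:
--             return 'dauuuuuun'
--         key = (x, y, lvl)
--         if key in cache:
--             return cache[key]
--         results = [solve(x + 2, y, lvl + 1), solve(x + y, y, lvl + 1),
--                    solve(x, y + 2, lvl + 1), solve(x, y + x, lvl + 1)]
--         if any(r == "go" for r in results):
--             res = "w1"
--         elif all(r == "w1" for r in results):
--             res = "l1"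
--         elif any(r == "l1" for r in results):
--             res = "w2"
--         elif all(r == "w1" or r == "w2" for r in results):
--             res = "l2"
--         else:
--             res = None
--         cache[key] = res
--         return res
--
--     return solve(x, y, lvl)
-- ===== Notes on version B (the rewrite author's own statement) =====
-- stated objective: alternative
-- what changed: B memoizes the game recursion with a per-call cache keyed on (x, y, lvl), computing each distinct state once instead of re-expanding the full 4-ary tree.
import Mathlib
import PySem

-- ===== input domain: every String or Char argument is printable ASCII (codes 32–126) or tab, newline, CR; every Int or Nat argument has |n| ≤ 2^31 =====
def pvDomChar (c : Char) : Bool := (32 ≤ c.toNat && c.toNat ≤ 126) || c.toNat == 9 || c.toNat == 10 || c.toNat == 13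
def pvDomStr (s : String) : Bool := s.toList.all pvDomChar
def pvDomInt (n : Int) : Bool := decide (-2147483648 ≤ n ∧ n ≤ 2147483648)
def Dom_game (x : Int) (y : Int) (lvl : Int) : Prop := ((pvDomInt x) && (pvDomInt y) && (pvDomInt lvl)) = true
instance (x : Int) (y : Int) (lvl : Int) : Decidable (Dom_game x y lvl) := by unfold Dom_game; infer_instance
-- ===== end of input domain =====

-- B memoizes the identical game recursion with a cache keyed on (x, y, lvl), computing each
-- distinct state once instead of re-expanding the whole 4-ary tree.


-- The any/all label-combination chain over the four children's results; this block is
-- textually identical in A and in B, so it is factored into one shared helper.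
def gameCombine (results : List (Option String)) : Option String :=
  if results.any (fun r => r == some "go") then some "w1"
  else if results.all (fun r => r == some "w1") then some "l1"
  else if results.any (fun r => r == some "l1") then some "w2"
  else if results.all (fun r => r == some "w1" || r == some "w2") then some "l2"
  else none

-- ===== PORT A =====
-- Structural recursion on a fuel counter that only makes the Python recursion total:
-- called with fuel = (6 - lvl).toNat, the `0 => none` branch is unreachable (when fuel
-- hits 0, lvl > 5 already returned), so the computation is exactly A's.
def gameFuel (fuel : Nat) (x : Int) (y : Int) (lvl : Int) : Option String :=
  if x + y ≥ 38 then some "go"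
  else if lvl > 5 then some "dauuuuuun"
  else match fuel with
    | 0 => none
    | fuel + 1 =>
      let results := [gameFuel fuel (x + 2) y (lvl + 1), gameFuel fuel (x + y) y (lvl + 1),
                      gameFuel fuel x (y + 2) (lvl + 1), gameFuel fuel x (y + x) (lvl + 1)]
      gameCombine results

def game (x : Int) (y : Int) (lvl : Int) : Option String :=
  gameFuel (6 - lvl).toNat x y lvl

-- ===== PORT B =====
-- B's nested helper `solve`: same moves and label combination, threading a memo cache;
-- the same fuel counter makes it total (the `0` branch is unreachable from game_alt).
def gameSolve (fuel : Nat) (x : Int) (y : Int) (lvl : Int)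
    (cache : PySem.Dict (Int × Int × Int) (Option String)) :
    Option String × PySem.Dict (Int × Int × Int) (Option String) :=
  if x + y ≥ 38 then (some "go", cache)
  else if lvl > 5 then (some "dauuuuuun", cache)
  else
    match cache.get? (x, y, lvl) with
    | some v => (v, cache)
    | none =>
      match fuel with
      | 0 => (none, cache)
      | fuel + 1 =>
        let p1 := gameSolve fuel (x + 2) y (lvl + 1) cache
        let p2 := gameSolve fuel (x + y) y (lvl + 1) p1.2
        let p3 := gameSolve fuel x (y + 2) (lvl + 1) p2.2
        let p4 := gameSolve fuel x (y + x) (lvl + 1) p3.2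
        let res := gameCombine [p1.1, p2.1, p3.1, p4.1]
        (res, p4.2.insert (x, y, lvl) res)

def game_alt (x : Int) (y : Int) (lvl : Int) : Option String :=
  (gameSolve (6 - lvl).toNat x y lvl PySem.Dict.empty).1

-- ===== PRECONDITION & SPEC =====
-- Pre_ excludes deeply negative lvl (with x + y < 38): there the Python A's recursion depth
-- 7 - lvl exceeds the interpreter's recursion limit and A raises RecursionError instead of
-- returning a value (B hits the same limit); the Lean ports are mathematically total, so
-- those inputs are carved out.
def Pre_game (x : Int) (y : Int) (lvl : Int) : Prop := x + y ≥ 38 ∨ lvl ≥ -900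
instance (x : Int) (y : Int) (lvl : Int) : Decidable (Pre_game x y lvl) := by unfold Pre_game; infer_instance
def pvWitness_game : Int × Int × Int := (0, 0, 0)

def Spec_game (x : Int) (y : Int) (lvl : Int) (out : Option String) : Prop := out = game_alt x y lvl
instance (x : Int) (y : Int) (lvl : Int) (out : Option String) : Decidable (Spec_game x y lvl out) := by unfold Spec_game; infer_instance

-- ===== CLAIM (what is proved, stated in full; the proofs are below) =====
def Claim_equal_game : Prop := ∀ (x : Int) (y : Int) (lvl : Int), Dom_game x y lvl → Pre_game x y lvl → Spec_game x y lvl (game x y lvl)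

-- ===== LEMMAS AND PROOFS =====

-- Cache invariant: every memoized entry is the plain (un-memoized) value of its state.
def CacheOK (c : PySem.Dict (Int × Int × Int) (Option String)) : Prop :=
  ∀ k v, c.get? k = some v → v = game k.1 k.2.1 k.2.2

theorem game_eq_base {x y lvl : Int} (h : x + y ≥ 38 ∨ lvl > 5) :
    game x y lvl = if x + y ≥ 38 then some "go" else some "dauuuuuun" := by
  rw [game, gameFuel.eq_def]
  rcases h with h | h
  · rw [if_pos h, if_pos h]
  · by_cases h38 : x + y ≥ 38
    · rw [if_pos h38, if_pos h38]
    · rw [if_neg h38, if_neg h38, if_pos h]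

theorem game_eq_combine {x y lvl : Int} (h : ¬ x + y ≥ 38) (hlvl : ¬ lvl > 5) :
    game x y lvl = gameCombine [game (x + 2) y (lvl + 1), game (x + y) y (lvl + 1),
                                game x (y + 2) (lvl + 1), game x (y + x) (lvl + 1)] := by
  have hf : (6 - lvl).toNat = (6 - (lvl + 1)).toNat + 1 := by omega
  conv_lhs => rw [game, hf, gameFuel.eq_def]
  rw [if_neg h, if_neg hlvl]
  rfl

theorem gameSolve_correct (n : Nat) :
    ∀ (x y lvl : Int) (c : PySem.Dict (Int × Int × Int) (Option String)),
      (6 - lvl).toNat = n → CacheOK c →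
      (gameSolve n x y lvl c).1 = game x y lvl ∧ CacheOK (gameSolve n x y lvl c).2 := by
  induction n with
  | zero =>
    intro x y lvl c hn hc
    have hlvl : lvl > 5 := by omega
    rw [gameSolve]
    by_cases h : x + y ≥ 38
    · rw [if_pos h]
      exact ⟨by rw [game_eq_base (Or.inl h), if_pos h], hc⟩
    · rw [if_neg h, if_pos hlvl]
      exact ⟨by rw [game_eq_base (Or.inr hlvl), if_neg h], hc⟩
  | succ n ih =>
    intro x y lvl c hn hc
    rw [gameSolve]
    by_cases h : x + y ≥ 38
    · rw [if_pos h]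
      exact ⟨by rw [game_eq_base (Or.inl h), if_pos h], hc⟩
    · rw [if_neg h]
      by_cases hlvl : lvl > 5
      · rw [if_pos hlvl]
        exact ⟨by rw [game_eq_base (Or.inr hlvl), if_neg h], hc⟩
      · rw [if_neg hlvl]
        cases hget : c.get? (x, y, lvl) with
        | some v => exact ⟨hc _ _ hget, hc⟩
        | none =>
          have hm : (6 - (lvl + 1)).toNat = n := by omega
          obtain ⟨e1, k1⟩ := ih (x + 2) y (lvl + 1) c hm hc
          obtain ⟨e2, k2⟩ := ih (x + y) y (lvl + 1) _ hm k1
          obtain ⟨e3, k3⟩ := ih x (y + 2) (lvl + 1) _ hm k2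
          obtain ⟨e4, k4⟩ := ih x (y + x) (lvl + 1) _ hm k3
          simp only [e1, e2, e3, e4]
          refine ⟨(game_eq_combine h hlvl).symm, ?_⟩
          intro k v hkv
          rcases eq_or_ne k (x, y, lvl) with rfl | hne
          · rw [PySem.Dict.get?_insert_self] at hkv
            injection hkv with hkv
            subst hkv
            exact (game_eq_combine h hlvl).symm
          · rw [PySem.Dict.get?_insert_of_ne _ _ hne] at hkv
            exact k4 _ _ hkv

-- ===== VERDICT (by name: the statement is the Claim_ definition above) =====
theorem game_spec : Claim_equal_game := by
  intro x y lvl _ _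
  unfold Spec_game game_alt
  have h := gameSolve_correct (6 - lvl).toNat x y lvl PySem.Dict.empty rfl
    (by intro k v hkv; simp [PySem.Dict.get?_empty] at hkv)
  exact h.1.symm
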